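-- pv_equiv track=rewrite | github.com/wronai/nlp2cmd | src/nlp2cmd/adapters/shell.py | _generate_service_management
-- ===== SOURCE A (Python) =====
-- from typing import Any, Optional
--
-- def _generate_service_management(entities: dict[str, Any]) -> str:
--     """Generate service management command."""
--     action = entities.get("action", "")
--     service_name = entities.get("service_name", "")
--     full_text = str(entities.get("_full_text", "")).lower()
--
--     # Detect service from text
--     if not service_name:
--         for svc in ["nginx", "apache2", "mysql", "postgresql", "docker", "ssh", "redis"]:
--             if svc in full_text:
--                 service_name = svc
--                 break
--
--     if "status" in action or "status" in full_text:
--         if service_name: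
--             return f"systemctl status {service_name}"
--         return "systemctl status"
--     elif "uruchom" in action or "start" in action:
--         if service_name:
--             return f"sudo systemctl start {service_name}"
--         return "sudo systemctl start SERVICE"
--     elif "zatrzymaj" in action or "stop" in action:
--         if service_name:
--             return f"sudo systemctl stop {service_name}"
--         return "sudo systemctl stop SERVICE"
--     elif "restart" in action or "restartuj" in full_text:
--         if service_name:
--             return f"sudo systemctl restart {service_name}"
--         return "sudo systemctl restart SERVICE"
--     elif "enable" in action or "włącz" in full_text:
--         if service_name:
--             return f"sudo systemctl enable {service_name}"
--         return "sudo systemctl enable SERVICE"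
--     elif "disable" in action or "wyłącz" in full_text:
--         if service_name:
--             return f"sudo systemctl disable {service_name}"
--         return "sudo systemctl disable SERVICE"
--     elif "lista" in action or "list" in action:
--         return "systemctl list-units --type=service"
--     elif "journalctl" in full_text or "logi" in full_text:
--         if service_name:
--             return f"journalctl -u {service_name} -f"
--         return "journalctl -f"
--     elif "crontab" in full_text or "cron" in action:
--         if "edytuj" in full_text or "edit" in action:
--             return "crontab -e"
--         return "crontab -l"
--
--     return "systemctl list-units --type=service"
-- ===== SOURCE B (Python) =====
-- _SERVICES = ["nginx", "apache2", "mysql", "postgresql", "docker", "ssh", "redis"]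
--
-- _KEYWORDS = [
--     ("status",  [("a", "status"), ("t", "status")]),
--     ("start",   [("a", "uruchom"), ("a", "start")]),
--     ("stop",    [("a", "zatrzymaj"), ("a", "stop")]),
--     ("restart", [("a", "restart"), ("t", "restartuj")]),
--     ("enable",  [("a", "enable"), ("t", "w\u0142\u0105cz")]),
--     ("disable", [("a", "disable"), ("t", "wy\u0142\u0105cz")]),
--     ("list",    [("a", "lista"), ("a", "list")]),
--     ("logs",    [("t", "journalctl"), ("t", "logi")]),
--     ("cron",    [("t", "crontab"), ("a", "cron")]),
-- ]
-- _PRIORITY = [intent for intent, _ in _KEYWORDS]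
--
--
-- def _render(intent, name, edit):
--     """Render a command from a symbolic intent."""
--     if intent in ("start", "stop", "restart", "enable", "disable"):
--         return f"sudo systemctl {intent} " + (name if name else "SERVICE")
--     if intent == "status":
--         return f"systemctl status {name}" if name else "systemctl status"
--     if intent == "logs":
--         return f"journalctl -u {name} -f" if name else "journalctl -f"
--     if intent == "cron":
--         return "crontab -e" if edit else "crontab -l"
--     return "systemctl list-units --type=service"
--
--
-- def _generate_service_management(entities):
--     """Classify into a symbolic intent, then render the command."""
--     action = entities.get("action", "")
--     service_name = entities.get("service_name", "")
--     full_text = str(entities.get("_full_text", "")).lower()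
--     if not service_name:
--         hits = [svc for svc in _SERVICES if svc in full_text]
--         service_name = hits[0] if hits else ""
--     fields = {"a": action, "t": full_text}
--     matched = [intent for intent, kws in _KEYWORDS
--                if any(kw in fields[f] for f, kw in kws)]
--     intent = next((i for i in _PRIORITY if i in matched), "list")
--     return _render(intent, service_name,
--                    "edytuj" in full_text or "edit" in action)
-- ===== Notes on version B (the rewrite author's own statement) =====
-- stated objective: alternative
-- what changed: Replaces A's direct 9-branch elif chain returning hard-coded strings by a two-stage pipeline: a matching pass computes the list of ALL firing symbolic intents (keyword groups over action/full_text), a priority selection picks the first, and a separate compositional renderer builds the command string from (intent, service_name, edit); service detection becomes filter-then-head instead of break-on-first.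
import Mathlib
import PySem

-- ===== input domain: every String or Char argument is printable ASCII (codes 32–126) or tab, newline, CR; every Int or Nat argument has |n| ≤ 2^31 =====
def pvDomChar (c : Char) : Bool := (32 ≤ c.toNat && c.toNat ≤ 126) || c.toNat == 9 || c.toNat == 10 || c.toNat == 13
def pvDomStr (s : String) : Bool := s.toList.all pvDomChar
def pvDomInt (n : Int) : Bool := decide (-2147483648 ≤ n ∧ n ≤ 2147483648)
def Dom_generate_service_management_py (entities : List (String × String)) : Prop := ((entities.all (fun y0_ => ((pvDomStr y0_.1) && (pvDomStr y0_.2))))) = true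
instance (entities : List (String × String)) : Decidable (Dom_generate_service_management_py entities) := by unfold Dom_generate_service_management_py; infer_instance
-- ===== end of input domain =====

-- B replaces A's elif chain of hard-coded result strings by a two-stage pipeline
-- (collect all matching symbolic intents, select by priority, render compositionally);
-- objective: alternative decomposition, same behaviour.

-- ===== PORT A =====

-- A's service-detection loop: first svc of the list contained in full_text, "" if none
def pvDetect (full_text : String) : List String → String
  | [] => ""
  | svc :: rest => if PySem.Str.isIn svc full_text then svc else pvDetect full_text rest

-- A's elif chain (the body after action/service_name/full_text are extracted)
def pvBranchA (action full_text service_name : String) : String :=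
  if PySem.Str.isIn "status" action || PySem.Str.isIn "status" full_text then
    (if service_name ≠ "" then "systemctl status " ++ service_name else "systemctl status")
  else if PySem.Str.isIn "uruchom" action || PySem.Str.isIn "start" action then
    (if service_name ≠ "" then "sudo systemctl start " ++ service_name else "sudo systemctl start SERVICE")
  else if PySem.Str.isIn "zatrzymaj" action || PySem.Str.isIn "stop" action then
    (if service_name ≠ "" then "sudo systemctl stop " ++ service_name else "sudo systemctl stop SERVICE")
  else if PySem.Str.isIn "restart" action || PySem.Str.isIn "restartuj" full_text then
    (if service_name ≠ "" then "sudo systemctl restart " ++ service_name else "sudo systemctl restart SERVICE")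
  else if PySem.Str.isIn "enable" action || PySem.Str.isIn "włącz" full_text then
    (if service_name ≠ "" then "sudo systemctl enable " ++ service_name else "sudo systemctl enable SERVICE")
  else if PySem.Str.isIn "disable" action || PySem.Str.isIn "wyłącz" full_text then
    (if service_name ≠ "" then "sudo systemctl disable " ++ service_name else "sudo systemctl disable SERVICE")
  else if PySem.Str.isIn "lista" action || PySem.Str.isIn "list" action then
    "systemctl list-units --type=service"
  else if PySem.Str.isIn "journalctl" full_text || PySem.Str.isIn "logi" full_text then
    (if service_name ≠ "" then "journalctl -u " ++ service_name ++ " -f" else "journalctl -f")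
  else if PySem.Str.isIn "crontab" full_text || PySem.Str.isIn "cron" action then
    (if PySem.Str.isIn "edytuj" full_text || PySem.Str.isIn "edit" action then "crontab -e" else "crontab -l")
  else
    "systemctl list-units --type=service"

def generate_service_management_py (entities : List (String × String)) : String :=
  let d := PySem.Dict.ofList entities
  let action := d.getD "action" ""
  let service_name0 := d.getD "service_name" ""
  let full_text := PySem.Str.lower (d.getD "_full_text" "")
  let service_name :=
    if service_name0 = "" then
      pvDetect full_text ["nginx", "apache2", "mysql", "postgresql", "docker", "ssh", "redis"]
    else service_name0
  pvBranchA action full_text service_name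

-- ===== PORT B =====

def pvKeywords : List (String × List (String × String)) :=
  [ ("status",  [("a", "status"), ("t", "status")]),
    ("start",   [("a", "uruchom"), ("a", "start")]),
    ("stop",    [("a", "zatrzymaj"), ("a", "stop")]),
    ("restart", [("a", "restart"), ("t", "restartuj")]),
    ("enable",  [("a", "enable"), ("t", "włącz")]),
    ("disable", [("a", "disable"), ("t", "wyłącz")]),
    ("list",    [("a", "lista"), ("a", "list")]),
    ("logs",    [("t", "journalctl"), ("t", "logi")]),
    ("cron",    [("t", "crontab"), ("a", "cron")]) ]

def pvPriority : List String := pvKeywords.map Prod.fst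

-- _render: build the command compositionally from the symbolic intent
def pvRender (intent name : String) (edit : Bool) : String :=
  if intent ∈ ["start", "stop", "restart", "enable", "disable"] then
    ("sudo systemctl " ++ intent ++ " ") ++ (if name ≠ "" then name else "SERVICE")
  else if intent = "status" then
    (if name ≠ "" then "systemctl status " ++ name else "systemctl status")
  else if intent = "logs" then
    (if name ≠ "" then "journalctl -u " ++ name ++ " -f" else "journalctl -f")
  else if intent = "cron" then
    (if edit then "crontab -e" else "crontab -l")
  else "systemctl list-units --type=service"

def generate_service_management_py_alt (entities : List (String × String)) : String :=
  let d := PySem.Dict.ofList entities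
  let action := d.getD "action" ""
  let service_name0 := d.getD "service_name" ""
  let full_text := PySem.Str.lower (d.getD "_full_text" "")
  let service_name :=
    if service_name0 = "" then
      (match ["nginx", "apache2", "mysql", "postgresql", "docker", "ssh", "redis"].filter
          (fun svc => PySem.Str.isIn svc full_text) with
        | [] => ""
        | h :: _ => h)
    else service_name0
  let fields := fun f => if f == "a" then action else full_text
  let matched := (pvKeywords.filter
      (fun kv => kv.2.any (fun p => PySem.Str.isIn p.2 (fields p.1)))).map Prod.fst
  let intent := (pvPriority.find? (fun i => matched.contains i)).getD "list"
  pvRender intent service_name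
    (PySem.Str.isIn "edytuj" full_text || PySem.Str.isIn "edit" action)

-- ===== PRECONDITION & SPEC =====
def Spec_generate_service_management_py (entities : List (String × String)) (out : String) : Prop := out = generate_service_management_py_alt entities
instance (entities : List (String × String)) (out : String) : Decidable (Spec_generate_service_management_py entities out) := by unfold Spec_generate_service_management_py; infer_instance

-- ===== CLAIM (what is proved, stated in full; the proofs are below) =====
def Claim_equal_generate_service_management_py : Prop := ∀ (entities : List (String × String)), Dom_generate_service_management_py entities → Spec_generate_service_management_py entities (generate_service_management_py entities)

-- ===== LEMMAS AND PROOFS =====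

-- A's break-on-first-hit detection loop = B's filter-then-head
theorem pvDetect_eq (full_text : String) (l : List String) :
    pvDetect full_text l =
      (match l.filter (fun svc => PySem.Str.isIn svc full_text) with
        | [] => "" | h :: _ => h) := by
  induction l with
  | nil => rfl
  | cons svc rest ih =>
    simp only [pvDetect, List.filter_cons]
    cases h : PySem.Str.isIn svc full_text <;> simp [ih]

-- priority selection over the matched list = first pair with a true condition (keys nodup)
theorem pvSelect_eq (l : List (Bool × String)) (d : String)
    (hnd : (l.map Prod.snd).Nodup) :
    (((l.map Prod.snd).find?
        (fun i => ((l.filter (fun q => q.1)).map Prod.snd).contains i)).getD d)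
      = (((l.find? (fun q => q.1)).map Prod.snd).getD d) := by
  induction l with
  | nil => rfl
  | cons q rest ih =>
    obtain ⟨b, k⟩ := q
    simp only [List.map_cons, List.nodup_cons] at hnd
    cases b with
    | true =>
      rw [List.map_cons, List.find?_cons_of_pos (p := fun q : Bool × String => q.1) rfl,
        List.find?_cons_of_pos
          (by rw [List.filter_cons_of_pos rfl, List.map_cons]; simp)]
      rfl
    | false =>
      simp only [List.filter_cons_of_neg
        (show ¬((false, k) : Bool × String).1 = true by simp)]
      have hk : ((rest.filter (fun q => q.1)).map Prod.snd).contains k = false := by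
        simp only [List.contains_eq_mem, decide_eq_false_iff_not]
        intro hmem
        obtain ⟨q, hq, rfl⟩ := List.mem_map.mp hmem
        exact hnd.1 (List.mem_map_of_mem (List.mem_of_mem_filter hq))
      rw [List.map_cons, List.find?_cons_of_neg (by rw [hk]; simp),
          List.find?_cons_of_neg (by simp)]
      exact ih hnd.2

-- the per-condition list the proofs abstract the chain over
def pvConds (action full_text : String) : List (Bool × String) :=
  [ (PySem.Str.isIn "status" action || PySem.Str.isIn "status" full_text, "status"),
    (PySem.Str.isIn "uruchom" action || PySem.Str.isIn "start" action, "start"),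
    (PySem.Str.isIn "zatrzymaj" action || PySem.Str.isIn "stop" action, "stop"),
    (PySem.Str.isIn "restart" action || PySem.Str.isIn "restartuj" full_text, "restart"),
    (PySem.Str.isIn "enable" action || PySem.Str.isIn "włącz" full_text, "enable"),
    (PySem.Str.isIn "disable" action || PySem.Str.isIn "wyłącz" full_text, "disable"),
    (PySem.Str.isIn "lista" action || PySem.Str.isIn "list" action, "list"),
    (PySem.Str.isIn "journalctl" full_text || PySem.Str.isIn "logi" full_text, "logs"),
    (PySem.Str.isIn "crontab" full_text || PySem.Str.isIn "cron" action, "cron") ]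

-- B's matched list (filter over the keyword table) = matched list over pvConds
theorem pvMatched_eq (action full_text : String) :
    ((pvKeywords.filter
        (fun kv => kv.2.any (fun p => PySem.Str.isIn p.2
          (if p.1 == "a" then action else full_text)))).map Prod.fst)
      = (((pvConds action full_text).filter (fun q => q.1)).map Prod.snd) := by
  simp [pvKeywords, pvConds, List.filter_cons, apply_ite (List.map Prod.fst),
    apply_ite (List.map (Prod.snd (α := Bool) (β := String)))]

-- B's selector expression in first-true-condition form
theorem pvSelector_norm (action full_text : String) :
    ((pvPriority.find?
        (fun i => ((pvKeywords.filter
          (fun kv => kv.2.any (fun p => PySem.Str.isIn p.2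
            (if p.1 == "a" then action else full_text)))).map Prod.fst).contains i)).getD "list")
      = ((((pvConds action full_text).find? (fun q => q.1)).map Prod.snd).getD "list") := by
  rw [pvMatched_eq,
    show pvPriority = (pvConds action full_text).map Prod.snd from rfl]
  exact pvSelect_eq _ "list" (by simp [pvConds])

-- pvRender at each literal intent
theorem pvRender_status (n : String) (e : Bool) :
    pvRender "status" n e =
      (if n ≠ "" then "systemctl status " ++ n else "systemctl status") := by
  unfold pvRender; rw [if_neg (by decide), if_pos rfl]

theorem pvRender_start (n : String) (e : Bool) :
    pvRender "start" n e =
      (if n ≠ "" then "sudo systemctl start " ++ n else "sudo systemctl start SERVICE") := by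
  unfold pvRender; rw [if_pos (by decide)]
  by_cases h : n = ""
  · subst h; decide
  · rw [if_pos h, if_pos h]; exact congrArg (· ++ n) (by decide)

theorem pvRender_stop (n : String) (e : Bool) :
    pvRender "stop" n e =
      (if n ≠ "" then "sudo systemctl stop " ++ n else "sudo systemctl stop SERVICE") := by
  unfold pvRender; rw [if_pos (by decide)]
  by_cases h : n = ""
  · subst h; decide
  · rw [if_pos h, if_pos h]; exact congrArg (· ++ n) (by decide)

theorem pvRender_restart (n : String) (e : Bool) :
    pvRender "restart" n e =
      (if n ≠ "" then "sudo systemctl restart " ++ n else "sudo systemctl restart SERVICE") := by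
  unfold pvRender; rw [if_pos (by decide)]
  by_cases h : n = ""
  · subst h; decide
  · rw [if_pos h, if_pos h]; exact congrArg (· ++ n) (by decide)

theorem pvRender_enable (n : String) (e : Bool) :
    pvRender "enable" n e =
      (if n ≠ "" then "sudo systemctl enable " ++ n else "sudo systemctl enable SERVICE") := by
  unfold pvRender; rw [if_pos (by decide)]
  by_cases h : n = ""
  · subst h; decide
  · rw [if_pos h, if_pos h]; exact congrArg (· ++ n) (by decide)

theorem pvRender_disable (n : String) (e : Bool) :
    pvRender "disable" n e =
      (if n ≠ "" then "sudo systemctl disable " ++ n else "sudo systemctl disable SERVICE") := by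
  unfold pvRender; rw [if_pos (by decide)]
  by_cases h : n = ""
  · subst h; decide
  · rw [if_pos h, if_pos h]; exact congrArg (· ++ n) (by decide)

theorem pvRender_list (n : String) (e : Bool) :
    pvRender "list" n e = "systemctl list-units --type=service" := by
  unfold pvRender
  rw [if_neg (by decide), if_neg (by decide), if_neg (by decide), if_neg (by decide)]

theorem pvRender_logs (n : String) (e : Bool) :
    pvRender "logs" n e =
      (if n ≠ "" then "journalctl -u " ++ n ++ " -f" else "journalctl -f") := by
  unfold pvRender; rw [if_neg (by decide), if_neg (by decide), if_pos rfl]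

theorem pvRender_cron (n : String) (e : Bool) :
    pvRender "cron" n e = (if e then "crontab -e" else "crontab -l") := by
  unfold pvRender
  rw [if_neg (by decide), if_neg (by decide), if_neg (by decide), if_pos rfl]

-- the elif chain equals select-then-render over pvConds
theorem pvChain_eq (action full_text name : String) :
    pvBranchA action full_text name =
      pvRender ((((pvConds action full_text).find? (fun q => q.1)).map Prod.snd).getD "list")
        name (PySem.Str.isIn "edytuj" full_text || PySem.Str.isIn "edit" action) := by
  simp only [pvBranchA, pvConds]
  cases h1 : (PySem.Str.isIn "status" action || PySem.Str.isIn "status" full_text) <;>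
  cases h2 : (PySem.Str.isIn "uruchom" action || PySem.Str.isIn "start" action) <;>
  cases h3 : (PySem.Str.isIn "zatrzymaj" action || PySem.Str.isIn "stop" action) <;>
  cases h4 : (PySem.Str.isIn "restart" action || PySem.Str.isIn "restartuj" full_text) <;>
  cases h5 : (PySem.Str.isIn "enable" action || PySem.Str.isIn "włącz" full_text) <;>
  cases h6 : (PySem.Str.isIn "disable" action || PySem.Str.isIn "wyłącz" full_text) <;>
  cases h7 : (PySem.Str.isIn "lista" action || PySem.Str.isIn "list" action) <;>
  cases h8 : (PySem.Str.isIn "journalctl" full_text || PySem.Str.isIn "logi" full_text) <;>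
  cases h9 : (PySem.Str.isIn "crontab" full_text || PySem.Str.isIn "cron" action) <;>
    simp [pvRender_status, pvRender_start, pvRender_stop, pvRender_restart,
      pvRender_enable, pvRender_disable, pvRender_list, pvRender_logs, pvRender_cron]

-- ===== VERDICT (by name: the statement is the Claim_ definition above) =====
theorem generate_service_management_py_spec : Claim_equal_generate_service_management_py := by
  intro entities _
  show generate_service_management_py entities = generate_service_management_py_alt entities
  unfold generate_service_management_py generate_service_management_py_alt
  simp only [pvDetect_eq, pvSelector_norm, pvChain_eq]
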